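-- pv_equiv track=rewrite | github.com/pypi-data/pypi-mirror-282 | packages/typsytex/typsytex-1.0.1-py3-none-any.whl/typsytex.py | handle_special_argument_lists
-- ===== SOURCE A (Python) =====
-- def get_top_level_commas(s: str, symbols: list[str] = [',']) -> list[int]:
--     r"""
--     This function figures out which commas in the string `s` are not inside of pairs of parentheses, brackets, etc,
--     in order to split strings like `a, b, f(x, y), g(1, 2) + h(4, g(5, 2))` into separate items without cutting `f(x, y)` into
--     two parts.
--     Returns a list of indices of top level commas in `s`.
--     """
--     i = 0
--     enclosings = []
--     top_level_commas = []
--     while i < len(s):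
--         if s[i] in symbols and len(enclosings) == 0:
--                 top_level_commas.append(i)
--         elif s[i] == '"':
--             if len(enclosings) > 0 and enclosings[-1] == '"':
--                 enclosings = enclosings[:-1]
--             else:
--                 enclosings.append('"')
--         elif s[i] == "'":
--             if len(enclosings) > 0 and enclosings[-1] == "'":
--                 enclosings = enclosings[:-1]
--             else:
--                 enclosings.append("'")
--         elif s[i] in ['(', '{', '[']:
--             enclosings.append(s[i])
--         elif s[i] in [')', '}', ']']:
--             assert(len(enclosings) > 0)
--             enclosings = enclosings[:-1]
--         i += 1
--     return top_level_commas
--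
-- def handle_special_argument_lists(text: str, typst_command: str, command_start: int, command_end: int, bracket_opens: int, bracket_closes: int):
--     r"""
--     Converts typst-style argument list for `text` and `mat` commands in math mode to their LaTeX equivalents.
--     The `text` command is here purely because it can be used in several ways: `text[abc]` and `text([abc])` and `#text[abc]` etc.
--     """
--     args_start = bracket_opens + 1
--     args_end = bracket_closes
--     replacements = []
--     if typst_command == 'text':
--         if command_start > 0 and text[command_start-1] == '#':
--             command_start -= 1
--         replacements.append(((command_start, command_end), r'\text'))
--
--         bracket_opens_end = bracket_opens + 1
--         if text[bracket_opens] == '(' and text[bracket_opens+1] == '[':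
--             bracket_opens_end += 1
--         replacements.append(((bracket_opens, bracket_opens_end), '{'))
--
--         bracket_closes_start = bracket_closes
--         if text[bracket_closes] == ')' and text[bracket_closes-1] == ']':
--             bracket_closes_start -= 1
--         replacements.append(((bracket_closes_start, bracket_closes+1), '}'))
--     elif typst_command == 'mat':
--         args = text[args_start:args_end]
--         row_separators = [ semicolon_pos + args_start for semicolon_pos in get_top_level_commas(args, symbols=[';']) ]
--         row_ranges = []
--         if len(row_separators) > 0:
--             row_ranges.append((args_start, row_separators[0]))
--             row_ranges += [ (row_separators[i], row_separators[i+1]) for i in range(len(row_separators) - 1) ]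
--             row_ranges.append((row_separators[-1], args_end))
--         else:
--             row_ranges = [(args_start, args_end)]
--         rows_commas = []
--         for row_start, row_end in row_ranges:
--             row = text[row_start:row_end]
--             rows_commas.append([ comma_pos + row_start for comma_pos in get_top_level_commas(row) ])
--
--         for semicolon_pos in row_separators:
--             replacements.append(((semicolon_pos, semicolon_pos+1), r' \\'))
--         for commas_list in rows_commas:
--             for comma_pos in commas_list:
--                 replacements.append(((comma_pos, comma_pos+1), r' &'))
--         need_space_after_start = not text[bracket_opens+1].isspace()
--         replacements.append(((command_start, bracket_opens+1), r'\left(\begin{matrix}' + (' ' if need_space_after_start else '')))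
--         need_space_before_end = not text[bracket_closes-1].isspace()
--         replacements.append(((bracket_closes, bracket_closes+1), (' ' if need_space_before_end else '') + r'\end{matrix}\right)'))
--     else:
--         raise NotImplementedError(f"Unknown special command passed: {typst_command}!")
--     return replacements
-- ===== SOURCE B (Python) =====
-- def handle_special_argument_lists(text: str, typst_command: str, command_start: int, command_end: int, bracket_opens: int, bracket_closes: int):
--     r"""
--     Converts a typst-style argument list for `text` / `mat` to LaTeX replacements.
--     Single-pass variant: the `mat` branch classifies top-level ';' and ',' in one
--     left-to-right scan instead of slicing rows and rescanning each of them.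
--     """
--     args_start = bracket_opens + 1
--     args_end = bracket_closes
--     if typst_command == 'text':
--         start = command_start - 1 if command_start > 0 and text[command_start - 1] == '#' else command_start
--         open_end = bracket_opens + (2 if text[bracket_opens] == '(' and text[bracket_opens + 1] == '[' else 1)
--         close_start = bracket_closes - (1 if text[bracket_closes] == ')' and text[bracket_closes - 1] == ']' else 0)
--         return [((start, command_end), r'\text'),
--                 ((bracket_opens, open_end), '{'),
--                 ((close_start, bracket_closes + 1), '}')]
--     if typst_command != 'mat':
--         raise NotImplementedError(f"Unknown special command passed: {typst_command}!")
--     semicolons = []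
--     commas = []
--     stack = []
--     for i, c in enumerate(text[args_start:args_end], start=args_start):
--         if not stack and c in ';,':
--             (semicolons if c == ';' else commas).append(i)
--         elif c in '"\'':
--             if stack and stack[-1] == c:
--                 stack.pop()
--             else:
--                 stack.append(c)
--         elif c in '({[':
--             stack.append(c)
--         elif c in ')}]':
--             assert stack
--             stack.pop()
--     replacements = [((p, p + 1), r' \\') for p in semicolons]
--     replacements += [((p, p + 1), r' &') for p in commas]
--     replacements.append(((command_start, bracket_opens + 1),
--                          r'\left(\begin{matrix}' + (' ' if not text[bracket_opens + 1].isspace() else '')))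
--     replacements.append(((bracket_closes, bracket_closes + 1),
--                          (' ' if not text[bracket_closes - 1].isspace() else '') + r'\end{matrix}\right)'))
--     return replacements
-- ===== Notes on version B (the rewrite author's own statement) =====
-- stated objective: simpler
-- what changed: The 'mat' branch's two-phase scan (find top-level semicolons, slice each row out of the text, rescan every row for commas) is replaced by one left-to-right pass over the argument substring that classifies top-level ';' and ',' with a single enclosing stack; the row slicing and rescanning disappear.
import Mathlib
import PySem

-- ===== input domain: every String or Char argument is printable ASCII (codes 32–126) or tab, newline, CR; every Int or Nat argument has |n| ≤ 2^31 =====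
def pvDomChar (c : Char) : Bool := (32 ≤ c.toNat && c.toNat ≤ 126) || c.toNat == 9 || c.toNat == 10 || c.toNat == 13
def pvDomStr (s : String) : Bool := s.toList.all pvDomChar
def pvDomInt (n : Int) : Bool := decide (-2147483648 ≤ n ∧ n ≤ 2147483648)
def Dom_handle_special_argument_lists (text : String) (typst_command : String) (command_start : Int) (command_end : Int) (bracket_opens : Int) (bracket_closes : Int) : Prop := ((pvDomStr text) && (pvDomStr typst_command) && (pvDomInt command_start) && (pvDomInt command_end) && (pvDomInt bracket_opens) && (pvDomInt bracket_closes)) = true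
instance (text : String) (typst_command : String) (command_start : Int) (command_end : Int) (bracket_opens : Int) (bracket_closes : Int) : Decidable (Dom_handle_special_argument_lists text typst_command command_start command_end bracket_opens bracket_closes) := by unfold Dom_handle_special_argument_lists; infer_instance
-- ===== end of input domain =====

-- B replaces A's "find top-level semicolons, slice the row ranges out of the text, rescan every row
-- for commas" mat logic by ONE left-to-right scan of the argument string that classifies top-level
-- ';' and ',' as it goes (objective: simpler — the row slicing/rescanning disappears).

-- ===== PORT A =====

-- get_top_level_commas: while-loop over s with an `enclosings` stack (top = head).
-- Python's `assert len(enclosings) > 0` before a pop is excluded by Pre_; the port pops with .tail there.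
def gtlcAux (symbols : List Char) : List Char → Int → List Char → List Int
  | [], _, _ => []
  | c :: rest, i, enc =>
    if symbols.contains c ∧ enc = [] then
      i :: gtlcAux symbols rest (i + 1) enc
    else if c = '"' then
      (if enc ≠ [] ∧ enc.head? = some '"' then gtlcAux symbols rest (i + 1) enc.tail
       else gtlcAux symbols rest (i + 1) ('"' :: enc))
    else if c = '\'' then
      (if enc ≠ [] ∧ enc.head? = some '\'' then gtlcAux symbols rest (i + 1) enc.tail
       else gtlcAux symbols rest (i + 1) ('\'' :: enc))
    else if c = '(' ∨ c = '{' ∨ c = '[' then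
      gtlcAux symbols rest (i + 1) (c :: enc)
    else if c = ')' ∨ c = '}' ∨ c = ']' then
      gtlcAux symbols rest (i + 1) enc.tail
    else
      gtlcAux symbols rest (i + 1) enc

def get_top_level_commas (s : List Char) (symbols : List Char) : List Int :=
  gtlcAux symbols s 0 []

def handle_special_argument_lists (text : String) (typst_command : String) (command_start : Int) (command_end : Int) (bracket_opens : Int) (bracket_closes : Int) : List ((Int × Int) × String) :=
  let tl := text.toList
  let args_start := bracket_opens + 1
  let args_end := bracket_closes
  if typst_command = "text" then
    let command_start' :=
      if command_start > 0 ∧ PySem.List.pyGetD tl (command_start - 1) '\x00' = '#' then command_start - 1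
      else command_start
    let r1 := ((command_start', command_end), "\\text")
    let bracket_opens_end :=
      if PySem.List.pyGetD tl bracket_opens '\x00' = '(' ∧ PySem.List.pyGetD tl (bracket_opens + 1) '\x00' = '[' then bracket_opens + 2
      else bracket_opens + 1
    let r2 := ((bracket_opens, bracket_opens_end), "{")
    let bracket_closes_start :=
      if PySem.List.pyGetD tl bracket_closes '\x00' = ')' ∧ PySem.List.pyGetD tl (bracket_closes - 1) '\x00' = ']' then bracket_closes - 1
      else bracket_closes
    [r1, r2, ((bracket_closes_start, bracket_closes + 1), "}")]
  else if typst_command = "mat" then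
    let args := PySem.List.slice tl (some args_start) (some args_end)
    let row_separators := (get_top_level_commas args [';']).map (fun p => p + args_start)
    let row_ranges : List (Int × Int) :=
      if row_separators.length > 0 then
        ((args_start, PySem.List.pyGetD row_separators 0 0) :: row_separators.zip row_separators.tail)
          ++ [(PySem.List.pyGetD row_separators (-1) 0, args_end)]
      else [(args_start, args_end)]
    let rows_commas := row_ranges.map (fun rr =>
      let row := PySem.List.slice tl (some rr.1) (some rr.2)
      (get_top_level_commas row [',']).map (fun p => p + rr.1))
    let reps1 := row_separators.map (fun p => ((p, p + 1), " \\\\"))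
    let reps2 := rows_commas.flatMap (fun cl => cl.map (fun p => ((p, p + 1), " &")))
    let need_space_after_start := !(PySem.Chars.isspace (PySem.List.pyGetD tl (bracket_opens + 1) '\x00'))
    let r3 := ((command_start, bracket_opens + 1), "\\left(\\begin{matrix}" ++ (if need_space_after_start then " " else ""))
    let need_space_before_end := !(PySem.Chars.isspace (PySem.List.pyGetD tl (bracket_closes - 1) '\x00'))
    let r4 := ((bracket_closes, bracket_closes + 1), (if need_space_before_end then " " else "") ++ "\\end{matrix}\\right)")
    reps1 ++ reps2 ++ [r3, r4]
  else []  -- Python raises NotImplementedError here; excluded by Pre_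

-- ===== PORT B =====

-- single pass over args (enumerate with start=args_start): one stack, two accumulators
def scanArgs : List Char → Int → List Char → (List Int × List Int)
  | [], _, _ => ([], [])
  | c :: rest, i, stack =>
    if stack = [] ∧ (c = ';' ∨ c = ',') then
      let r := scanArgs rest (i + 1) stack
      if c = ';' then (i :: r.1, r.2) else (r.1, i :: r.2)
    else if c = '"' ∨ c = '\'' then
      (if stack ≠ [] ∧ stack.head? = some c then scanArgs rest (i + 1) stack.tail
       else scanArgs rest (i + 1) (c :: stack))
    else if c = '(' ∨ c = '{' ∨ c = '[' then
      scanArgs rest (i + 1) (c :: stack)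
    else if c = ')' ∨ c = '}' ∨ c = ']' then
      scanArgs rest (i + 1) stack.tail
    else
      scanArgs rest (i + 1) stack

def handle_special_argument_lists_alt (text : String) (typst_command : String) (command_start : Int) (command_end : Int) (bracket_opens : Int) (bracket_closes : Int) : List ((Int × Int) × String) :=
  let tl := text.toList
  let args_start := bracket_opens + 1
  let args_end := bracket_closes
  if typst_command = "text" then
    let start :=
      if command_start > 0 ∧ PySem.List.pyGetD tl (command_start - 1) '\x00' = '#' then command_start - 1
      else command_start
    let open_end := bracket_opens +
      (if PySem.List.pyGetD tl bracket_opens '\x00' = '(' ∧ PySem.List.pyGetD tl (bracket_opens + 1) '\x00' = '[' then 2 else 1)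
    let close_start := bracket_closes -
      (if PySem.List.pyGetD tl bracket_closes '\x00' = ')' ∧ PySem.List.pyGetD tl (bracket_closes - 1) '\x00' = ']' then 1 else 0)
    [((start, command_end), "\\text"), ((bracket_opens, open_end), "{"), ((close_start, bracket_closes + 1), "}")]
  else if typst_command = "mat" then
    let args := PySem.List.slice tl (some args_start) (some args_end)
    let sc := scanArgs args args_start []
    sc.1.map (fun p => ((p, p + 1), " \\\\"))
      ++ sc.2.map (fun p => ((p, p + 1), " &"))
      ++ [((command_start, bracket_opens + 1), "\\left(\\begin{matrix}" ++ (if !(PySem.Chars.isspace (PySem.List.pyGetD tl (bracket_opens + 1) '\x00')) then " " else "")),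
          ((bracket_closes, bracket_closes + 1), (if !(PySem.Chars.isspace (PySem.List.pyGetD tl (bracket_closes - 1) '\x00')) then " " else "") ++ "\\end{matrix}\\right)")]
  else []  -- Python raises NotImplementedError here; excluded by Pre_

-- ===== PRECONDITION & SPEC =====

-- one enclosing-stack step (quotes toggle, openers push, closers pop — none on an empty stack = Python's failed assert)
def encStep (st : Option (List Char)) (c : Char) : Option (List Char) :=
  st.bind (fun enc =>
    if c = '"' ∨ c = '\'' then some (if enc.head? = some c then enc.tail else c :: enc)
    else if c = '(' ∨ c = '{' ∨ c = '[' then some (c :: enc)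
    else if c = ')' ∨ c = '}' ∨ c = ']' then (match enc with | [] => none | _ :: t => some t)
    else some enc)

-- the argument string never closes an enclosing that is not open (otherwise Python's assert fails)
def balancedOk (s : List Char) : Bool := (s.foldl encStep (some [])).isSome

-- Pre_ = exactly the inputs on which Python A returns normally: the command is 'text' or 'mat'
-- (else NotImplementedError), every character index A reads is a valid Python index (else IndexError),
-- and for 'mat' the argument substring never pops an empty enclosing stack (else AssertionError).
def Pre_handle_special_argument_lists (text : String) (typst_command : String) (command_start : Int) (command_end : Int) (bracket_opens : Int) (bracket_closes : Int) : Prop :=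
  (typst_command = "text" ∧
     (command_start ≤ 0 ∨ command_start - 1 < (text.toList.length : Int)) ∧
     PySem.Raise.InRange text.toList.length bracket_opens ∧
     (PySem.List.pyGet? text.toList bracket_opens = some '(' → PySem.Raise.InRange text.toList.length (bracket_opens + 1)) ∧
     PySem.Raise.InRange text.toList.length bracket_closes ∧
     (PySem.List.pyGet? text.toList bracket_closes = some ')' → PySem.Raise.InRange text.toList.length (bracket_closes - 1)))
  ∨ (typst_command = "mat" ∧
     PySem.Raise.InRange text.toList.length (bracket_opens + 1) ∧
     PySem.Raise.InRange text.toList.length (bracket_closes - 1) ∧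
     balancedOk (PySem.List.slice text.toList (some (bracket_opens + 1)) (some bracket_closes)) = true)

instance (text : String) (typst_command : String) (command_start : Int) (command_end : Int) (bracket_opens : Int) (bracket_closes : Int) : Decidable (Pre_handle_special_argument_lists text typst_command command_start command_end bracket_opens bracket_closes) := by unfold Pre_handle_special_argument_lists; unfold PySem.Raise.InRange; infer_instance

def pvWitness_handle_special_argument_lists : String × String × Int × Int × Int × Int :=
  ("mat(a, b; c, d)", "mat", 0, 3, 3, 14)

def Spec_handle_special_argument_lists (text : String) (typst_command : String) (command_start : Int) (command_end : Int) (bracket_opens : Int) (bracket_closes : Int) (out : List ((Int × Int) × String)) : Prop := out = handle_special_argument_lists_alt text typst_command command_start command_end bracket_opens bracket_closes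
instance (text : String) (typst_command : String) (command_start : Int) (command_end : Int) (bracket_opens : Int) (bracket_closes : Int) (out : List ((Int × Int) × String)) : Decidable (Spec_handle_special_argument_lists text typst_command command_start command_end bracket_opens bracket_closes out) := by unfold Spec_handle_special_argument_lists; infer_instance

-- ===== CLAIM (what is proved, stated in full; the proofs are below) =====
def Claim_equal_handle_special_argument_lists : Prop := ∀ (text : String) (typst_command : String) (command_start : Int) (command_end : Int) (bracket_opens : Int) (bracket_closes : Int), Dom_handle_special_argument_lists text typst_command command_start command_end bracket_opens bracket_closes → Pre_handle_special_argument_lists text typst_command command_start command_end bracket_opens bracket_closes → Spec_handle_special_argument_lists text typst_command command_start command_end bracket_opens bracket_closes (handle_special_argument_lists text typst_command command_start command_end bracket_opens bracket_closes)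

-- ===== LEMMAS AND PROOFS =====

-- total single step of the enclosing stack (pop on empty = no-op; agrees with Python wherever A returns)
def estep (enc : List Char) (c : Char) : List Char :=
  if c = '"' ∨ c = '\'' then (if enc.head? = some c then enc.tail else c :: enc)
  else if c = '(' ∨ c = '{' ∨ c = '[' then c :: enc
  else if c = ')' ∨ c = '}' ∨ c = ']' then enc.tail
  else enc

-- local (0-based, shift-free) version of the top-level scan
def tls (symbols : List Char) : List Char → List Char → List Nat
  | [], _ => []
  | c :: rest, enc =>
    let r := (tls symbols rest (estep enc c)).map (· + 1)
    if symbols.contains c ∧ enc = [] then 0 :: r else r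

-- "position j of s holds a symbol and the enclosing stack is empty there"
def qTop (symbols : List Char) (s : List Char) (j : Nat) : Bool :=
  (match s[j]? with | some c => symbols.contains c | none => false)
    && ((s.take j).foldl estep [] == [])

theorem tls_eq_filter (symbols : List Char) : ∀ (s : List Char) (enc : List Char),
    tls symbols s enc = (List.range s.length).filter
      (fun j => (match s[j]? with | some c => symbols.contains c | none => false)
          && ((s.take j).foldl estep enc == [])) := by
  intro s
  induction s with
  | nil => intro enc; simp [tls]
  | cons c rest ih =>
    intro enc
    rw [List.length_cons, List.range_succ_eq_map, List.filter_cons]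
    simp only [List.getElem?_cons_zero, List.take_zero, List.foldl_nil, List.filter_map]
    have htail : (List.filter
        ((fun j => (match (c :: rest)[j]? with | some c' => symbols.contains c' | none => false)
            && (((c :: rest).take j).foldl estep enc == [])) ∘ Nat.succ) (List.range rest.length)).map Nat.succ
        = (tls symbols rest (estep enc c)).map (· + 1) := by
      rw [ih (estep enc c)]
      simp [Function.comp_def, List.take_succ_cons, Nat.succ_eq_add_one]
    by_cases h : symbols.contains c ∧ enc = []
    · have hcond : (symbols.contains c && (enc == [])) = true := by
        simp only [Bool.and_eq_true, beq_iff_eq]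
        exact ⟨h.1, h.2⟩
      rw [hcond]
      rw [tls]
      simp only [if_pos h]
      rw [← htail]
      simp
    · have hcond : (symbols.contains c && (enc == [])) = false := by
        simp only [Bool.and_eq_false_iff]
        by_cases hc : symbols.contains c = true
        · right
          refine beq_eq_false_iff_ne.mpr ?_
          intro he
          exact h ⟨hc, he⟩
        · left
          simpa using hc
      rw [hcond]
      rw [tls]
      simp only [if_neg h]
      rw [← htail]
      simp

theorem gtlcAux_cons (symbols : List Char) (c : Char) (rest : List Char) (i : Int) (enc : List Char) :
    gtlcAux symbols (c :: rest) i enc =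
      (if symbols.contains c ∧ enc = [] then
        i :: gtlcAux symbols rest (i + 1) enc
      else if c = '"' then
        (if enc ≠ [] ∧ enc.head? = some '"' then gtlcAux symbols rest (i + 1) enc.tail
         else gtlcAux symbols rest (i + 1) ('"' :: enc))
      else if c = '\'' then
        (if enc ≠ [] ∧ enc.head? = some '\'' then gtlcAux symbols rest (i + 1) enc.tail
         else gtlcAux symbols rest (i + 1) ('\'' :: enc))
      else if c = '(' ∨ c = '{' ∨ c = '[' then
        gtlcAux symbols rest (i + 1) (c :: enc)
      else if c = ')' ∨ c = '}' ∨ c = ']' then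
        gtlcAux symbols rest (i + 1) enc.tail
      else
        gtlcAux symbols rest (i + 1) enc) := rfl

theorem gtlcAux_eq_tls (symbols : List Char)
    (hs : ∀ c ∈ symbols, c ≠ '"' ∧ c ≠ '\'' ∧ ¬(c = '(' ∨ c = '{' ∨ c = '[') ∧ ¬(c = ')' ∨ c = '}' ∨ c = ']')) :
    ∀ (s : List Char) (i : Int) (enc : List Char),
    gtlcAux symbols s i enc = (tls symbols s enc).map (fun (j : Nat) => i + (j : Int)) := by
  intro s
  induction s with
  | nil => intro i enc; simp [gtlcAux, tls]
  | cons c rest ih =>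
    intro i enc
    have hmap : ∀ (enc' : List Char),
        ((tls symbols rest enc').map (· + 1)).map (fun (j : Nat) => i + (j : Int))
          = gtlcAux symbols rest (i + 1) enc' := by
      intro enc'
      rw [ih (i + 1) enc', List.map_map]
      apply List.map_congr_left
      intro j _
      simp only [Function.comp_apply]
      push_cast
      ring
    rw [gtlcAux_cons, tls]
    by_cases h1 : symbols.contains c ∧ enc = []
    · have hc : c ∈ symbols := by simpa using h1.1
      obtain ⟨hq1, hq2, hq3, hq4⟩ := hs c hc
      have hestep : estep enc c = enc := by
        simp [estep, hq3, hq4]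
        intro hor
        rcases hor with h | h
        · exact absurd h hq1
        · exact absurd h hq2
      rw [if_pos h1, if_pos h1, hestep]
      simp only [List.map_cons]
      rw [hmap enc]
      simp
    · rw [if_neg h1, if_neg h1]
      by_cases h2 : c = '"'
      · subst h2
        rw [if_pos rfl]
        by_cases h3 : enc ≠ [] ∧ enc.head? = some '"'
        · rw [if_pos h3]
          have : estep enc '"' = enc.tail := by simp [estep, h3.2]
          rw [this, hmap]
        · rw [if_neg h3]
          have hh : ¬ enc.head? = some '"' := by
            intro hsome
            exact h3 ⟨by rintro rfl; simp at hsome, hsome⟩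
          have : estep enc '"' = '"' :: enc := by simp [estep, hh]
          rw [this, hmap]
      · by_cases h2' : c = '\''
        · subst h2'
          rw [if_neg (by simp), if_pos rfl]
          by_cases h3 : enc ≠ [] ∧ enc.head? = some '\''
          · rw [if_pos h3]
            have : estep enc '\'' = enc.tail := by simp [estep, h3.2]
            rw [this, hmap]
          · rw [if_neg h3]
            have hh : ¬ enc.head? = some '\'' := by
              intro hsome
              exact h3 ⟨by rintro rfl; simp at hsome, hsome⟩
            have : estep enc '\'' = '\'' :: enc := by simp [estep, hh]
            rw [this, hmap]
        · rw [if_neg h2, if_neg h2']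
          by_cases h4 : c = '(' ∨ c = '{' ∨ c = '['
          · rw [if_pos h4]
            have : estep enc c = c :: enc := by simp [estep, h2, h2', h4]
            rw [this, hmap]
          · rw [if_neg h4]
            by_cases h5 : c = ')' ∨ c = '}' ∨ c = ']'
            · rw [if_pos h5]
              have : estep enc c = enc.tail := by simp [estep, h2, h2', h4, h5]
              rw [this, hmap]
            · rw [if_neg h5]
              have : estep enc c = enc := by simp [estep, h2, h2', h4, h5]
              rw [this, hmap]

theorem scanArgs_cons (c : Char) (rest : List Char) (i : Int) (stack : List Char) :
    scanArgs (c :: rest) i stack =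
      (if stack = [] ∧ (c = ';' ∨ c = ',') then
        (if c = ';' then (i :: (scanArgs rest (i + 1) stack).1, (scanArgs rest (i + 1) stack).2)
         else ((scanArgs rest (i + 1) stack).1, i :: (scanArgs rest (i + 1) stack).2))
      else if c = '"' ∨ c = '\'' then
        (if stack ≠ [] ∧ stack.head? = some c then scanArgs rest (i + 1) stack.tail
         else scanArgs rest (i + 1) (c :: stack))
      else if c = '(' ∨ c = '{' ∨ c = '[' then
        scanArgs rest (i + 1) (c :: stack)
      else if c = ')' ∨ c = '}' ∨ c = ']' then
        scanArgs rest (i + 1) stack.tail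
      else
        scanArgs rest (i + 1) stack) := rfl

theorem scanArgs_eq : ∀ (s : List Char) (i : Int) (enc : List Char),
    scanArgs s i enc = ((tls [';'] s enc).map (fun (j : Nat) => i + (j : Int)),
                       (tls [','] s enc).map (fun (j : Nat) => i + (j : Int))) := by
  intro s
  induction s with
  | nil => intro i enc; simp [scanArgs, tls]
  | cons c rest ih =>
    intro i enc
    have hmap : ∀ (L : List Nat), (L.map (· + 1)).map (fun (j : Nat) => i + (j : Int))
        = L.map (fun (j : Nat) => (i + 1) + (j : Int)) := by
      intro L
      rw [List.map_map]
      apply List.map_congr_left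
      intro j _
      simp only [Function.comp_apply]
      push_cast
      ring
    rw [scanArgs_cons, tls, tls]
    by_cases h1 : enc = [] ∧ (c = ';' ∨ c = ',')
    · obtain ⟨he, hc⟩ := h1
      subst he
      rw [if_pos ⟨rfl, hc⟩]
      rcases hc with rfl | rfl
      · have hest : estep [] ';' = [] := by simp [estep]
        rw [if_pos rfl, hest, ih (i + 1) []]
        simp [hmap]
      · have hest : estep [] ',' = [] := by simp [estep]
        rw [if_neg (by decide), hest, ih (i + 1) []]
        simp [hmap]
    · rw [if_neg h1]
      have hns : ¬([';'].contains c ∧ enc = []) := by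
        rintro ⟨hcc, rfl⟩
        exact h1 ⟨rfl, Or.inl (by simpa using hcc)⟩
      have hnc : ¬([','].contains c ∧ enc = []) := by
        rintro ⟨hcc, rfl⟩
        exact h1 ⟨rfl, Or.inr (by simpa using hcc)⟩
      rw [if_neg hns, if_neg hnc]
      by_cases h2 : c = '"' ∨ c = '\''
      · rw [if_pos h2]
        by_cases h3 : enc ≠ [] ∧ enc.head? = some c
        · rw [if_pos h3]
          have hest : estep enc c = enc.tail := by
            rcases h2 with rfl | rfl <;> simp [estep, h3.2]
          rw [hest, ih (i + 1) enc.tail]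
          simp [hmap]
        · rw [if_neg h3]
          have hh : ¬ enc.head? = some c := by
            intro hsome
            exact h3 ⟨by rintro rfl; simp at hsome, hsome⟩
          have hest : estep enc c = c :: enc := by
            rcases h2 with rfl | rfl <;> simp [estep, hh]
          rw [hest, ih (i + 1) (c :: enc)]
          simp [hmap]
      · rw [if_neg h2]
        by_cases h4 : c = '(' ∨ c = '{' ∨ c = '['
        · rw [if_pos h4]
          have hest : estep enc c = c :: enc := by simp [estep, h2, h4]
          rw [hest, ih (i + 1) (c :: enc)]
          simp [hmap]
        · rw [if_neg h4]
          by_cases h5 : c = ')' ∨ c = '}' ∨ c = ']'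
          · rw [if_pos h5]
            have hest : estep enc c = enc.tail := by simp [estep, h2, h4, h5]
            rw [hest, ih (i + 1) enc.tail]
            simp [hmap]
          · rw [if_neg h5]
            have hest : estep enc c = enc := by simp [estep, h2, h4, h5]
            rw [hest, ih (i + 1) enc]
            simp [hmap]

-- a row that starts where the stack is empty sees the same top-level positions as the whole string
theorem row_commas (s : List Char) (x y : Nat)
    (hx : (s.take x).foldl estep [] = []) (hxy : x ≤ y) (hyL : y ≤ s.length) :
    tls [','] ((s.drop x).take (y - x)) [] =
      (List.range (y - x)).filter (fun t => qTop [','] s (x + t)) := by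
  have hlen : ((s.drop x).take (y - x)).length = y - x := by
    simp only [List.length_take, List.length_drop]
    omega
  rw [tls_eq_filter, hlen]
  apply List.filter_congr
  intro j hj
  have hjlt : j < y - x := List.mem_range.mp hj
  have hget : ((s.drop x).take (y - x))[j]? = s[x + j]? := by
    rw [List.getElem?_take_of_lt hjlt, List.getElem?_drop]
  have htake : ((s.drop x).take (y - x)).take j = (s.drop x).take j := by
    rw [List.take_take]
    congr 1
    omega
  have hfold : (s.take (x + j)).foldl estep [] = ((s.drop x).take j).foldl estep [] := by
    rw [List.take_add, List.foldl_append, hx]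
  unfold qTop
  rw [hget, htake, hfold]

theorem shift_cast (n x : Nat) (a : Int) (Q : Nat → Bool) :
    ((List.range n).filter (fun t => Q (x + t))).map (fun (p : Nat) => ((p : Int)) + (a + (x : Int)))
      = ((List.range' x n).filter Q).map (fun (j : Nat) => a + (j : Int)) := by
  simp only [List.range'_eq_map_range, List.filter_map, List.map_map, Function.comp_def]
  apply List.map_congr_left
  intro j _
  push_cast
  ring

-- A's head/zip/last construction of row ranges, as one recursion
def rangesE (a : Int) (ae : Int) : List Int → List (Int × Int)
  | [] => [(a, ae)]
  | j :: σ => (a, j) :: rangesE j ae σ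

theorem rangesE_cons (a ae z : Int) (zs : List Int) :
    rangesE a ae (z :: zs) = (a, z) :: rangesE z ae zs := rfl

theorem rangesE_eq (ae : Int) : ∀ (rs : List Int) (a : Int),
    (if rs.length > 0 then
        ((a, PySem.List.pyGetD rs 0 0) :: rs.zip rs.tail) ++ [(PySem.List.pyGetD rs (-1) 0, ae)]
      else [(a, ae)]) = rangesE a ae rs := by
  intro rs
  induction rs with
  | nil => intro a; simp [rangesE]
  | cons z t ih =>
    intro a
    cases t with
    | nil =>
      rw [if_pos (by simp), PySem.List.pyGetD_neg_one [z] 0 (List.cons_ne_nil z [])]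
      simp [rangesE]
    | cons z2 t2 =>
      have hlast : PySem.List.pyGetD (z :: z2 :: t2) (-1) 0 = PySem.List.pyGetD (z2 :: t2) (-1) 0 := by
        rw [PySem.List.pyGetD_neg_one (z :: z2 :: t2) 0 (List.cons_ne_nil z (z2 :: t2)),
            PySem.List.pyGetD_neg_one (z2 :: t2) 0 (List.cons_ne_nil z2 t2),
            List.getLast_cons (List.cons_ne_nil z2 t2)]
      have hz : PySem.List.pyGetD (z :: z2 :: t2) 0 0 = z := PySem.List.pyGetD_zero_cons _ _ _
      have hz2 : PySem.List.pyGetD (z2 :: t2) 0 0 = z2 := PySem.List.pyGetD_zero_cons _ _ _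
      have h2 := ih z
      rw [if_pos (by simp)] at h2 ⊢
      rw [hlast, hz]
      rw [rangesE]
      rw [← h2, hz2]
      simp

theorem clamp_shift (len : Nat) (a b : Int) (h1 : -(len : Int) ≤ a) (j : Nat)
    (hj : j < PySem.List.clampIdx len b - PySem.List.clampIdx len a) :
    PySem.List.clampIdx len (a + j) = PySem.List.clampIdx len a + j := by
  simp only [PySem.List.clampIdx] at hj ⊢
  split_ifs at hj ⊢ <;> omega

-- the heart: A's per-row rescans, flattened, are the top-level commas of args
theorem flat_aux (tl : List Char) (a ae : Int) (h1 : -(tl.length : Int) ≤ a) :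
    ∀ (σ : List Nat) (x : Nat),
    (x = 0 ∨ x < (PySem.List.slice tl (some a) (some ae)).length) →
    ((PySem.List.slice tl (some a) (some ae)).take x).foldl estep [] = [] →
    (∀ j ∈ σ, j < (PySem.List.slice tl (some a) (some ae)).length ∧
        ((PySem.List.slice tl (some a) (some ae)).take j).foldl estep [] = []) →
    (x :: σ).Pairwise (· ≤ ·) →
    (rangesE (a + (x : Int)) ae (σ.map (fun (j : Nat) => ((j : Int)) + a))).flatMap
        (fun rr => (tls [','] (PySem.List.slice tl (some rr.1) (some rr.2)) []).map
          (fun (p : Nat) => ((p : Int)) + rr.1))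
      = ((List.range' x ((PySem.List.slice tl (some a) (some ae)).length - x)).filter
          (qTop [','] (PySem.List.slice tl (some a) (some ae)))).map (fun (j : Nat) => a + (j : Int)) := by
  have hE0le : PySem.List.clampIdx tl.length ae ≤ tl.length := by
    simp only [PySem.List.clampIdx]
    split_ifs <;> omega
  have hargs' : PySem.List.slice tl (some a) (some ae)
      = (tl.drop (PySem.List.clampIdx tl.length a)).take
          (PySem.List.clampIdx tl.length ae - PySem.List.clampIdx tl.length a) := by
    simp [PySem.List.slice]
  have hL : (PySem.List.slice tl (some a) (some ae)).length
      = PySem.List.clampIdx tl.length ae - PySem.List.clampIdx tl.length a := by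
    rw [hargs']
    simp only [List.length_take, List.length_drop]
    omega
  have hF1 : ∀ (x : Nat), x = 0 ∨ x < (PySem.List.slice tl (some a) (some ae)).length →
      PySem.List.slice tl (some (a + (x : Int))) (some ae)
        = (PySem.List.slice tl (some a) (some ae)).drop x := by
    intro x hx
    rcases hx with rfl | hx
    · simp
    · rw [hL] at hx
      have hclamp := clamp_shift tl.length a ae h1 x (by omega)
      simp only [PySem.List.slice] at hclamp ⊢
      rw [hclamp, List.drop_take, List.drop_drop]
      congr 1
      omega
  have hF2 : ∀ (x y : Nat), x < (PySem.List.slice tl (some a) (some ae)).length →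
      y < (PySem.List.slice tl (some a) (some ae)).length → x ≤ y →
      PySem.List.slice tl (some (a + (x : Int))) (some (a + (y : Int)))
        = ((PySem.List.slice tl (some a) (some ae)).drop x).take (y - x) := by
    intro x y hx hy hxy
    rw [hL] at hx hy
    have hcx := clamp_shift tl.length a ae h1 x (by omega)
    have hcy := clamp_shift tl.length a ae h1 y (by omega)
    simp only [PySem.List.slice] at hcx hcy ⊢
    rw [hcx, hcy, List.drop_take, List.drop_drop, List.take_take]
    congr 1
    omega
  intro σ
  induction σ with
  | nil =>
    intro x hx hfold _ _
    have hxle : x ≤ (PySem.List.slice tl (some a) (some ae)).length := by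
      rcases hx with rfl | hx <;> omega
    rw [show rangesE (a + (x : Int)) ae ([].map (fun (j : Nat) => ((j : Int)) + a)) = [(a + (x : Int), ae)] from rfl]
    simp only [List.flatMap_cons, List.flatMap_nil, List.append_nil]
    rw [hF1 x hx]
    have hfull : (PySem.List.slice tl (some a) (some ae)).drop x
        = ((PySem.List.slice tl (some a) (some ae)).drop x).take
            ((PySem.List.slice tl (some a) (some ae)).length - x) := by
      rw [List.take_of_length_le]
      simp
    rw [hfull, row_commas (PySem.List.slice tl (some a) (some ae)) x
          (PySem.List.slice tl (some a) (some ae)).length hfold hxle le_rfl, shift_cast]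
  | cons j σ' ih =>
    intro x hx hfold hσ hpw
    have hj := hσ j (by simp)
    have hxj : x ≤ j := by
      rcases List.pairwise_cons.mp hpw with ⟨h, _⟩
      exact h j (by simp)
    have hxlt : x < (PySem.List.slice tl (some a) (some ae)).length := by
      rcases hx with rfl | hx <;> omega
    simp only [List.map_cons]
    rw [rangesE_cons]
    simp only [List.flatMap_cons]
    have hcomm : ((j : Int)) + a = a + (j : Int) := by ring
    rw [hcomm, hF2 x j hxlt hj.1 hxj,
        row_commas (PySem.List.slice tl (some a) (some ae)) x j hfold hxj (le_of_lt hj.1),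
        shift_cast]
    have hrest := ih j (Or.inr hj.1) hj.2
      (fun p hp => hσ p (by simp [hp]))
      ((List.pairwise_cons.mp hpw).2)
    rw [hrest, ← List.map_append, ← List.filter_append]
    have hr : List.range' x (j - x) ++ List.range' j ((PySem.List.slice tl (some a) (some ae)).length - j)
        = List.range' x ((PySem.List.slice tl (some a) (some ae)).length - x) := by
      have h := List.range'_append (s := x) (m := j - x)
        (n := (PySem.List.slice tl (some a) (some ae)).length - j) (step := 1)
      rw [show x + 1 * (j - x) = j by omega,
          show (j - x) + ((PySem.List.slice tl (some a) (some ae)).length - j)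
            = (PySem.List.slice tl (some a) (some ae)).length - x by omega] at h
      exact h
    rw [hr]

theorem flatMap_map' {α β γ : Type} (l : List α) (f : α → β) (g : β → List γ) :
    (l.map f).flatMap g = l.flatMap (fun a => g (f a)) := by
  induction l with
  | nil => simp
  | cons x t ih => simp [ih]

set_option maxRecDepth 8192 in
theorem seps_shift (args : List Char) (a : Int) :
    (get_top_level_commas args [';']).map (fun p => p + a)
      = (tls [';'] args []).map (fun (j : Nat) => ((j : Int)) + a) := by
  rw [get_top_level_commas, gtlcAux_eq_tls [';'] (by intro c hc; simp only [List.mem_singleton] at hc; subst hc; exact ⟨by simp, by simp, by simp, by simp⟩), List.map_map]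
  apply List.map_congr_left
  intro j _
  simp

set_option maxRecDepth 8192 in
theorem mat_flat (tl : List Char) (a ae : Int) (h1 : -(tl.length : Int) ≤ a) :
    (rangesE a ae ((get_top_level_commas (PySem.List.slice tl (some a) (some ae)) [';']).map (fun p => p + a))).flatMap
        (fun rr => (get_top_level_commas (PySem.List.slice tl (some rr.1) (some rr.2)) [',']).map (fun p => p + rr.1))
      = (tls [','] (PySem.List.slice tl (some a) (some ae)) []).map (fun (j : Nat) => a + (j : Int)) := by
  have hrow : ∀ rr : Int × Int,
      (get_top_level_commas (PySem.List.slice tl (some rr.1) (some rr.2)) [',']).map (fun p => p + rr.1)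
        = (tls [','] (PySem.List.slice tl (some rr.1) (some rr.2)) []).map (fun (p : Nat) => ((p : Int)) + rr.1) := by
    intro rr
    rw [get_top_level_commas, gtlcAux_eq_tls [','] (by intro c hc; simp only [List.mem_singleton] at hc; subst hc; exact ⟨by simp, by simp, by simp, by simp⟩), List.map_map]
    apply List.map_congr_left
    intro j _
    simp
  simp only [hrow]
  rw [seps_shift]
  have hσ : ∀ j ∈ tls [';'] (PySem.List.slice tl (some a) (some ae)) [],
      j < (PySem.List.slice tl (some a) (some ae)).length ∧
        ((PySem.List.slice tl (some a) (some ae)).take j).foldl estep [] = [] := by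
    intro j hj
    rw [tls_eq_filter] at hj
    have hmem := List.mem_filter.mp hj
    refine ⟨List.mem_range.mp hmem.1, ?_⟩
    have h2 := (Bool.and_eq_true _ _).mp hmem.2
    exact beq_iff_eq.mp h2.2
  have hpw : ((0 : Nat) :: tls [';'] (PySem.List.slice tl (some a) (some ae)) []).Pairwise (· ≤ ·) := by
    refine List.pairwise_cons.mpr ⟨fun y _ => Nat.zero_le y, ?_⟩
    rw [tls_eq_filter]
    exact (List.pairwise_lt_range.filter _).imp le_of_lt
  have h := flat_aux tl a ae h1 (tls [';'] (PySem.List.slice tl (some a) (some ae)) []) 0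
    (Or.inl rfl) (by simp) hσ hpw
  simp only [Nat.cast_zero, add_zero, Nat.sub_zero] at h
  rw [← List.range_eq_range'] at h
  rw [h, tls_eq_filter]
  rfl

-- ===== VERDICT (by name: the statement is the Claim_ definition above) =====
theorem handle_special_argument_lists_spec : Claim_equal_handle_special_argument_lists := by
  intro text typst_command command_start command_end bracket_opens bracket_closes hdom hpre
  unfold Spec_handle_special_argument_lists
  rcases hpre with ⟨ht, hpre1⟩ | ⟨hm, hio, hic, hbal⟩
  · subst ht
    simp only [handle_special_argument_lists, handle_special_argument_lists_alt, if_true]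
    split_ifs <;> simp
  · subst hm
    obtain ⟨hio1, hio2⟩ := hio
    simp only [handle_special_argument_lists, handle_special_argument_lists_alt, if_true]
    rw [if_neg (show ¬ (("mat" : String) = "text") from by simp),
        if_neg (show ¬ (("mat" : String) = "text") from by simp)]
    rw [scanArgs_eq, rangesE_eq, flatMap_map', ← List.map_flatMap,
        mat_flat text.toList (bracket_opens + 1) bracket_closes (by omega)]
    rw [seps_shift]
    dsimp only
    simp only [List.map_map]
    congr 1
    congr 1
    apply List.map_congr_left
    intro j _
    simp only [Function.comp_apply, Prod.mk.injEq]
    exact ⟨⟨by ring, by ring⟩, trivial⟩
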